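-- pv_equiv track=rewrite | github.com/chfogerty/advent-of-code | 2024/i/i.py | rle_checksum
-- ===== SOURCE A (Python) =====
-- def rle_checksum(rl_disk):
--     chksum = 0
--     idx = 0
--     for data in rl_disk:
--         for _ in range(data[1]):
--             chksum += idx * max(data[0], 0)
--             idx += 1
--     return chksum
-- ===== SOURCE B (Python) =====
-- def rle_checksum(rl_disk):
--     chksum = 0
--     idx = 0
--     for value, count in rl_disk:
--         n = count if count > 0 else 0
--         v = value if value > 0 else 0
--         chksum += v * (n * idx + n * (n - 1) // 2)
--         idx += n
--     return chksum
-- ===== Notes on version B (the rewrite author's own statement) =====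
-- stated objective: faster
-- what changed: Replaces the per-unit inner loop with a closed-form arithmetic-series contribution per run (v*(n*idx + n*(n-1)/2)), making the cost depend on the number of runs instead of the total disk length.
import Mathlib
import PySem

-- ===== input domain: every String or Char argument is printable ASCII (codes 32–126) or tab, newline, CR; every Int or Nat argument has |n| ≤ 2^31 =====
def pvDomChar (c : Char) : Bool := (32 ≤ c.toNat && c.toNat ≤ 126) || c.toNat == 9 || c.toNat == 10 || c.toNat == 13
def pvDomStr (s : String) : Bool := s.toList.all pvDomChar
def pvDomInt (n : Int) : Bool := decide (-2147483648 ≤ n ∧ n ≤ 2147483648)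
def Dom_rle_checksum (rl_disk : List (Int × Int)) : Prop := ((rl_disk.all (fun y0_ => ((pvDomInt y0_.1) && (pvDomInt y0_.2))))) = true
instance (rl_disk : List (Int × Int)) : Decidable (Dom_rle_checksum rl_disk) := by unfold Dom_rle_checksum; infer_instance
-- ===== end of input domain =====

-- ===== PORT A =====
-- One honest line: B replaces A's per-unit inner loop by a closed-form arithmetic-series sum per run (faster).
def rle_checksum (rl_disk : List (Int × Int)) : Int :=
  (rl_disk.foldl
    (fun (st : Int × Int) data =>
      (PySem.List.pyRange 0 data.2 1).foldl
        (fun (st : Int × Int) _ => (st.1 + st.2 * max data.1 0, st.2 + 1)) st)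
    (0, 0)).1

-- ===== PORT B =====
def rle_checksum_alt (rl_disk : List (Int × Int)) : Int :=
  (rl_disk.foldl
    (fun (st : Int × Int) vc =>
      let n : Int := if vc.2 > 0 then vc.2 else 0
      let v : Int := if vc.1 > 0 then vc.1 else 0
      (st.1 + v * (n * st.2 + PySem.Int.floordiv (n * (n - 1)) 2), st.2 + n))
    (0, 0)).1

-- ===== PRECONDITION & SPEC =====
def Spec_rle_checksum (rl_disk : List (Int × Int)) (out : Int) : Prop := out = rle_checksum_alt rl_disk
instance (rl_disk : List (Int × Int)) (out : Int) : Decidable (Spec_rle_checksum rl_disk out) := by unfold Spec_rle_checksum; infer_instance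

-- ===== CLAIM (what is proved, stated in full; the proofs are below) =====
def Claim_equal_rle_checksum : Prop := ∀ (rl_disk : List (Int × Int)), Dom_rle_checksum rl_disk → Spec_rle_checksum rl_disk (rle_checksum rl_disk)

-- ===== LEMMAS AND PROOFS =====

-- ===== VERDICT (by name: the statement is the Claim_ definition above) =====
-- inner loop of A, closed form
lemma inner_loop_closed (l : List Int) (v s i : Int) :
    l.foldl (fun (st : Int × Int) _ => (st.1 + st.2 * v, st.2 + 1)) (s, i)
      = (s + v * ((l.length : Int) * i + (l.length : Int) * ((l.length : Int) - 1) / 2),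
         i + l.length) := by
  induction l generalizing s i with
  | nil => simp
  | cons a t ih =>
      simp only [List.foldl_cons, List.length_cons, ih, Prod.mk.injEq]
      refine ⟨?_, ?_⟩
      · push_cast
        have h : ((t.length : Int) + 1) * ((t.length : Int) + 1 - 1) / 2
            = (t.length : Int) + (t.length : Int) * ((t.length : Int) - 1) / 2 := by
          have h2 : ((t.length : Int) + 1) * ((t.length : Int) + 1 - 1)
              = (t.length : Int) * ((t.length : Int) - 1) + (t.length : Int) * 2 := by ring
          rw [h2, Int.add_mul_ediv_right _ _ (by norm_num : (2:Int) ≠ 0)]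
          omega
        rw [h]; ring
      · push_cast; ring

lemma step_eq (st : Int × Int) (data : Int × Int) :
    (PySem.List.pyRange 0 data.2 1).foldl
        (fun (st : Int × Int) _ => (st.1 + st.2 * max data.1 0, st.2 + 1)) st
      = (let n : Int := if data.2 > 0 then data.2 else 0
         let v : Int := if data.1 > 0 then data.1 else 0
         (st.1 + v * (n * st.2 + PySem.Int.floordiv (n * (n - 1)) 2), st.2 + n)) := by
  obtain ⟨s, i⟩ := st
  rw [inner_loop_closed]
  have hlen : ((PySem.List.pyRange 0 data.2 1).length : Int)
      = (if data.2 > 0 then data.2 else 0) := by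
    simp [PySem.List.pyRange]
    omega
  have hv : max data.1 0 = if data.1 > 0 then data.1 else 0 := by
    split_ifs <;> omega
  rw [hlen, hv]
  have hfd : PySem.Int.floordiv
      ((if data.2 > 0 then data.2 else 0) * ((if data.2 > 0 then data.2 else 0) - 1)) 2
      = (if data.2 > 0 then data.2 else 0) * ((if data.2 > 0 then data.2 else 0) - 1) / 2 := by
    simp only [PySem.Int.floordiv]
    rw [Int.fdiv_eq_ediv]
    simp
  simp only [hfd]

theorem rle_checksum_spec : Claim_equal_rle_checksum := by
  intro rl _
  unfold Spec_rle_checksum rle_checksum rle_checksum_alt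
  have hf : (fun (st : Int × Int) (data : Int × Int) =>
      (PySem.List.pyRange 0 data.2 1).foldl
        (fun (st : Int × Int) _ => (st.1 + st.2 * max data.1 0, st.2 + 1)) st)
    = (fun (st : Int × Int) (vc : Int × Int) =>
      let n : Int := if vc.2 > 0 then vc.2 else 0
      let v : Int := if vc.1 > 0 then vc.1 else 0
      (st.1 + v * (n * st.2 + PySem.Int.floordiv (n * (n - 1)) 2), st.2 + n)) := by
    funext st d
    exact step_eq st d
  rw [hf]
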